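-- pv_equiv track=rewrite | github.com/Thump604/tradehub-engine | scripts/style.py | grid_pairs
-- ===== SOURCE A (Python) =====
-- def grid_pairs(pairs, left_w=24, right_w=18):
--     """
--     pairs: list of tuples [(label, value), ...]
--     Prints two pairs per row: (L1,V1) | (L2,V2).
--     """
--     out=[]
--     row=[]
--     for p in pairs:
--         row.append(p)
--         if len(row)==2:
--             (l1,v1),(l2,v2)=row
--             out.append(f"{l1:<{left_w}} {v1:>{right_w}}   {l2:<{left_w}} {v2:>{right_w}}")
--             row=[]
--     if row:  # last odd
--         (l1,v1)=row[0]
--         out.append(f"{l1:<{left_w}} {v1:>{right_w}}")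
--     return "\n".join(out)
-- ===== SOURCE B (Python) =====
-- def grid_pairs(pairs, left_w=24, right_w=18):
--     """
--     pairs: list of tuples [(label, value), ...]
--     Two pairs per row, via parity slices zipped together instead of a row buffer.
--     """
--     def cell(l, v):
--         return f"{l:<{left_w}} {v:>{right_w}}"
--     lines = [cell(l1, v1) + "   " + cell(l2, v2)
--              for (l1, v1), (l2, v2) in zip(pairs[::2], pairs[1::2])]
--     if len(pairs) % 2:
--         lines.append(cell(*pairs[-1]))
--     return "\n".join(lines)
-- ===== Notes on version B (the rewrite author's own statement) =====
-- stated objective: idiomatic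
-- what changed: Replaces A's stateful row-buffer loop (append, flush at 2, trailing-row check) with parity slices pairs[::2]/pairs[1::2] zipped into full two-column lines, plus an odd-length tail line.
import Mathlib
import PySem

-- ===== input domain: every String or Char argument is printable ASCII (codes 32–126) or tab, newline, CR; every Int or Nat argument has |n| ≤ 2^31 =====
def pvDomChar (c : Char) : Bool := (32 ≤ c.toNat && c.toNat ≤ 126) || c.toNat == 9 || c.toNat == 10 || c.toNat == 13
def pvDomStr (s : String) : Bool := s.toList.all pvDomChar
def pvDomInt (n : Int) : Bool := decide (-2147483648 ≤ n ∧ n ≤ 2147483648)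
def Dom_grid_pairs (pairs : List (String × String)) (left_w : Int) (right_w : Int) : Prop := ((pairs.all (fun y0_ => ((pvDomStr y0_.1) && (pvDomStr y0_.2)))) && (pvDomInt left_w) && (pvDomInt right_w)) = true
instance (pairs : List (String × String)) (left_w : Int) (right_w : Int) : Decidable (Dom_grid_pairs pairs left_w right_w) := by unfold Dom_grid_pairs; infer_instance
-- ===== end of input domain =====

-- B replaces A's stateful row-buffer loop with parity slices zipped into two-column lines (different decomposition, same cost).


-- ===== PORT A =====
-- f"{l:<{w}} {v:>{w'}}" for 0 ≤ w, w' (guaranteed by Pre_): pad with spaces, never truncate; exact on that domain.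
def pvCell (lw rw : Int) (p : String × String) : List Char :=
  (p.1.toList ++ List.replicate (lw.toNat - p.1.toList.length) ' ')
  ++ ' ' :: (List.replicate (rw.toNat - p.2.toList.length) ' ' ++ p.2.toList)

-- the body of A's `for p in pairs` loop, acting on the state (out, row)
def pvStepA (lw rw : Int) (st : List (List Char) × List (String × String))
    (p : String × String) : List (List Char) × List (String × String) :=
  let row := st.2 ++ [p]
  if row.length = 2 then
    match row with
    | [a, b] => (st.1 ++ [pvCell lw rw a ++ (' ' :: ' ' :: ' ' :: pvCell lw rw b)], [])
    | _ => (st.1, row)   -- unreachable (row has length 2 here)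
  else (st.1, row)

def grid_pairs (pairs : List (String × String)) (left_w : Int) (right_w : Int) : String :=
  let st := pairs.foldl (pvStepA left_w right_w) ([], [])
  let out := match st.2 with
    | [] => st.1
    | r :: _ => st.1 ++ [pvCell left_w right_w r]   -- "if row: … row[0]"
  String.ofList (PySem.Chars.join ['\n'] out)

-- ===== PORT B =====
def grid_pairs_alt (pairs : List (String × String)) (left_w : Int) (right_w : Int) : String :=
  let lefts := (PySem.List.slice? pairs none none 2).getD []       -- pairs[::2]  (step ≠ 0, never none)
  let rights := (PySem.List.slice? pairs (some 1) none 2).getD []  -- pairs[1::2]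
  let lines := (lefts.zip rights).map
    (fun pq => pvCell left_w right_w pq.1 ++ (' ' :: ' ' :: ' ' :: pvCell left_w right_w pq.2))
  let lines := if pairs.length % 2 = 1 then
      match PySem.List.pyGet? pairs (-1) with   -- pairs[-1]; length is odd, so in range
      | some p => lines ++ [pvCell left_w right_w p]
      | none => lines
    else lines
  String.ofList (PySem.Chars.join ['\n'] lines)

-- ===== PRECONDITION & SPEC =====
-- On nonempty pairs with a negative left_w or right_w the f-string raises ValueError in A (and likewise in B); Pre_ excludes exactly those inputs.
def Pre_grid_pairs (pairs : List (String × String)) (left_w : Int) (right_w : Int) : Prop :=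
  pairs = [] ∨ (0 ≤ left_w ∧ 0 ≤ right_w)
instance (pairs : List (String × String)) (left_w : Int) (right_w : Int) : Decidable (Pre_grid_pairs pairs left_w right_w) := by unfold Pre_grid_pairs; infer_instance
def pvWitness_grid_pairs : (List (String × String)) × Int × Int :=
  ([("alpha", "1"), ("beta", "22"), ("gamma", "333")], 8, 5)

def Spec_grid_pairs (pairs : List (String × String)) (left_w : Int) (right_w : Int) (out : String) : Prop := out = grid_pairs_alt pairs left_w right_w
instance (pairs : List (String × String)) (left_w : Int) (right_w : Int) (out : String) : Decidable (Spec_grid_pairs pairs left_w right_w out) := by unfold Spec_grid_pairs; infer_instance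

-- ===== CLAIM (what is proved, stated in full; the proofs are below) =====
def Claim_equal_grid_pairs : Prop := ∀ (pairs : List (String × String)) (left_w : Int) (right_w : Int), Dom_grid_pairs pairs left_w right_w → Pre_grid_pairs pairs left_w right_w → Spec_grid_pairs pairs left_w right_w (grid_pairs pairs left_w right_w)

-- ===== LEMMAS AND PROOFS =====

-- common characterisation of the output: the formatted lines, two pairs at a time
def pvLines (lw rw : Int) : List (String × String) → List (List Char)
  | [] => []
  | [a] => [pvCell lw rw a]
  | a :: b :: t => (pvCell lw rw a ++ (' ' :: ' ' :: ' ' :: pvCell lw rw b)) :: pvLines lw rw t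

def pvEvens {α : Type} : List α → List α
  | [] => []
  | [a] => [a]
  | a :: _ :: t => a :: pvEvens t

def pvOdds {α : Type} : List α → List α
  | [] => []
  | [_] => []
  | _ :: b :: t => b :: pvOdds t

theorem pvFM {α : Type} :
    ∀ xs : List α, (List.range ((xs.length + 1) / 2)).filterMap (fun k => xs[2 * k]?) = pvEvens xs := by
  intro xs
  induction xs using pvEvens.induct with
  | case1 => simp [pvEvens]
  | case2 a => simp [pvEvens]
  | case3 a b t ih =>
    have hc : ((a :: b :: t).length + 1) / 2 = (t.length + 1) / 2 + 1 := by simp; omega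
    rw [pvEvens, hc, List.range_succ_eq_map, List.filterMap_cons, List.filterMap_map]
    simp only [List.getElem?_cons_zero, Nat.mul_zero]
    have : (fun k => (a :: b :: t)[2 * k]?) ∘ (fun i => i + 1) = fun k => t[2 * k]? := by
      funext k
      have : 2 * (k + 1) = 2 * k + 1 + 1 := by ring
      simp [Function.comp, this]
    rw [this, ih]

theorem pvS1 {α : Type} (xs : List α) :
    PySem.List.slice? xs none none 2 = some (pvEvens xs) := by
  rw [← pvFM xs]
  simp only [PySem.List.slice?, PySem.List.sliceIndices]
  norm_num
  have hcount : (if 0 < xs.length then (((xs.length : Int) + 2 - 1) / 2).toNat else 0) = (xs.length + 1) / 2 := by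
    split_ifs with h
    · have h2 : ((xs.length : Int) + 2 - 1) = ((xs.length + 1 : Nat) : Int) := by push_cast; ring
      rw [h2]; omega
    · omega
  rw [hcount]
  apply List.filterMap_congr
  intro x hx
  congr 1

theorem pvFM2 {α : Type} :
    ∀ xs : List α, (List.range (xs.length / 2)).filterMap (fun k => xs[2 * k + 1]?) = pvOdds xs := by
  intro xs
  induction xs using pvOdds.induct with
  | case1 => simp [pvOdds]
  | case2 a => simp [pvOdds]
  | case3 a b t ih =>
    have hc : (a :: b :: t).length / 2 = t.length / 2 + 1 := by simp; omega
    rw [pvOdds, hc, List.range_succ_eq_map, List.filterMap_cons, List.filterMap_map]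
    simp only [Nat.mul_zero]
    have h0 : (a :: b :: t)[2 * 0 + 1]? = some b := by simp
    rw [h0]
    have : (fun k => (a :: b :: t)[2 * k + 1]?) ∘ (fun i => i + 1) = fun k => t[2 * k + 1]? := by
      funext k
      have h2 : 2 * (k + 1) + 1 = 2 * k + 1 + 1 + 1 := by ring
      simp [Function.comp, h2]
    rw [this, ih]

theorem pvS2 {α : Type} (xs : List α) :
    PySem.List.slice? xs (some 1) none 2 = some (pvOdds xs) := by
  rw [← pvFM2 xs]
  simp only [PySem.List.slice?, PySem.List.sliceIndices]
  norm_num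
  cases xs with
  | nil => simp
  | cons a t =>
    have hmin : min (1 : Int) ((a :: t).length : Int) = 1 := by simp
    rw [hmin]
    have hcount : (if 1 < (a :: t).length then ((((a :: t).length : Int) - 1 + 2 - 1) / 2).toNat else 0) = (a :: t).length / 2 := by
      split_ifs with h
      · omega
      · omega
    rw [hcount]
    apply List.filterMap_congr
    intro x hx
    congr 1
    omega

theorem pvFoldA (lw rw : Int) :
    ∀ (ps : List (String × String)) (out : List (List Char)),
      (match (ps.foldl (pvStepA lw rw) (out, [])).2 with
        | [] => (ps.foldl (pvStepA lw rw) (out, [])).1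
        | r :: _ => (ps.foldl (pvStepA lw rw) (out, [])).1 ++ [pvCell lw rw r])
      = out ++ pvLines lw rw ps := by
  intro ps
  induction ps using pvLines.induct with
  | case1 => intro out; simp [pvLines]
  | case2 a => intro out; simp [pvLines, pvStepA]
  | case3 a b t ih =>
    intro out
    have hstep : List.foldl (pvStepA lw rw) (out, []) (a :: b :: t)
        = List.foldl (pvStepA lw rw) (out ++ [pvCell lw rw a ++ (' ' :: ' ' :: ' ' :: pvCell lw rw b)], []) t := by
      simp [pvStepA]
    rw [hstep, ih, pvLines]
    simp

theorem pvBlines (lw rw : Int) :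
    ∀ ps : List (String × String),
      (((pvEvens ps).zip (pvOdds ps)).map
          (fun pq => pvCell lw rw pq.1 ++ (' ' :: ' ' :: ' ' :: pvCell lw rw pq.2)))
        ++ (if ps.length % 2 = 1 then
              match ps.getLast? with
              | some p => [pvCell lw rw p]
              | none => []
            else [])
      = pvLines lw rw ps := by
  intro ps
  induction ps using pvLines.induct with
  | case1 => simp [pvEvens, pvOdds, pvLines]
  | case2 a => simp [pvEvens, pvOdds, pvLines]
  | case3 a b t ih =>
    rw [pvLines, pvEvens, pvOdds]
    have hmod : (a :: b :: t).length % 2 = t.length % 2 := by simp; omega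
    rw [hmod]
    cases t with
    | nil => simp [pvEvens, pvOdds, pvLines]
    | cons c t' =>
      simp only [List.zip_cons_cons, List.map_cons, List.cons_append]
      rw [show (a :: b :: c :: t').getLast? = (c :: t').getLast? from by
        rw [List.getLast?_cons_cons, List.getLast?_cons_cons]]
      rw [ih]

-- ===== VERDICT (by name: the statement is the Claim_ definition above) =====
theorem grid_pairs_spec : Claim_equal_grid_pairs := by
  intro pairs lw rw _ _
  unfold Spec_grid_pairs grid_pairs grid_pairs_alt
  simp only [pvS1, pvS2, Option.getD_some, PySem.List.pyGet?_neg_one]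
  have hA := pvFoldA lw rw pairs []
  simp only [List.nil_append] at hA
  rw [hA, ← pvBlines lw rw pairs]
  by_cases h : pairs.length % 2 = 1 <;> cases hL : pairs.getLast? <;> simp [h, hL]
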